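-- pv_equiv track=rewrite | github.com/BaeJihyun97/CodingTest | 프로그래머스/2/340211. ［PCCP 기출문제］ 3번 ／ 충돌위험 찾기/［PCCP 기출문제］ 3번 ／ 충돌위험 찾기.py | check
-- ===== SOURCE A (Python) =====
-- def check(points):
--     lattice = dict()
--     crash = 0
--     for pL in points:
--         p = tuple(pL)
--         if p in lattice:
--             if lattice[p] == False: # 2회 이상 충돌 한번만 계산
--                 lattice[p] = True
--                 crash += 1
--         else:
--             lattice[p] = False
--     return crash
-- ===== SOURCE B (Python) =====
-- def check(points):
--     # Repeated partition: peel off the first point's whole occurrence group,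
--     # count it as a crash point if the group has size >= 2, recurse on the rest.
--     pts = [tuple(p) for p in points]
--     crash = 0
--     while pts:
--         head = pts[0]
--         rest = [q for q in pts[1:] if q != head]
--         if len(pts) - len(rest) >= 2:
--             crash += 1
--         pts = rest
--     return crash
-- ===== Notes on version B (the rewrite author's own statement) =====
-- stated objective: alternative
-- what changed: Replaces A's hash-table single pass (dict of point -> already-counted flag) with a hash-free repeated-partition scheme: peel off the entire occurrence group of the first remaining point, add one if that group has size >= 2, and continue on the filtered remainder.
import Mathlib
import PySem

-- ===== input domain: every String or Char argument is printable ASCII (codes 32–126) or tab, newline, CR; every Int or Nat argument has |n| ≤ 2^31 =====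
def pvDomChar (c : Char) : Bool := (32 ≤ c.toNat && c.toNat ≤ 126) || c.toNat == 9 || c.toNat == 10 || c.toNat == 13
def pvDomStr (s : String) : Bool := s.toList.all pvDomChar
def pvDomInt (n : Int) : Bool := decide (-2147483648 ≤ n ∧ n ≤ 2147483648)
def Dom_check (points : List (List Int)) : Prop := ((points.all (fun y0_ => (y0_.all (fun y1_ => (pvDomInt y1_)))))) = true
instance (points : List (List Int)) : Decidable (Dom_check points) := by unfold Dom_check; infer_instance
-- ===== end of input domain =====

-- B replaces A's hash-table single pass with a hash-free repeated partition by the first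
-- remaining point's occurrence group; equal return value, no speed claim.

-- ===== PORT A =====
-- loop body of A: dict of seen points → "already counted a collision here", plus crash counter
def checkStep (st : PySem.Dict (List Int) Bool × Int) (p : List Int) :
    PySem.Dict (List Int) Bool × Int :=
  if st.1.contains p then
    if st.1.getD p false == false then (st.1.insert p true, st.2 + 1) else st
  else (st.1.insert p false, st.2)

def check (points : List (List Int)) : Int :=
  (points.foldl checkStep (PySem.Dict.empty, 0)).2

-- ===== PORT B =====
-- Source B's while loop: peel off the whole occurrence group of the first remaining point
-- fuel = initial length (the loop removes ≥ 1 element per iteration, so it always suffices)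
def checkAltGo : Nat → List (List Int) → Int → Int
  | 0, _, crash => crash
  | _ + 1, [], crash => crash
  | n + 1, p :: t, crash =>
    let rest := t.filter (fun q => q ≠ p)
    checkAltGo n rest (if 2 ≤ ((p :: t).length : Int) - (rest.length : Int) then crash + 1 else crash)

def check_alt (points : List (List Int)) : Int :=
  checkAltGo points.length points 0

-- ===== PRECONDITION & SPEC =====
def Spec_check (points : List (List Int)) (out : Int) : Prop := out = check_alt points
instance (points : List (List Int)) (out : Int) : Decidable (Spec_check points out) := by unfold Spec_check; infer_instance

-- ===== CLAIM (what is proved, stated in full; the proofs are below) =====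
def Claim_equal_check : Prop := ∀ (points : List (List Int)), Dom_check points → Spec_check points (check points)

-- ===== LEMMAS AND PROOFS =====

lemma countP_congr_mem {α : Type} (l : List α) (f g : α → Bool)
    (h : ∀ x ∈ l, f x = g x) : l.countP f = l.countP g := by
  induction l with
  | nil => rfl
  | cons a t ih =>
    simp only [List.countP_cons, h a (by simp), ih (fun x hx => h x (by simp [hx]))]

-- countP increases by exactly one when the predicate flips false→true at one member of a Nodup list
lemma countP_flip {α : Type} [DecidableEq α] (l : List α) (hl : l.Nodup) (p : α) (hp : p ∈ l)
    (f g : α → Bool) (hne : ∀ q ∈ l, q ≠ p → f q = g q)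
    (hfp : f p = false) (hgp : g p = true) : l.countP g = l.countP f + 1 := by
  induction l with
  | nil => simp at hp
  | cons a t ih =>
    rcases List.mem_cons.mp hp with h | h
    · subst h
      have hpt : p ∉ t := (List.nodup_cons.mp hl).1
      have : t.countP f = t.countP g :=
        countP_congr_mem t f g (fun q hq => hne q (by simp [hq]) (fun e => hpt (e ▸ hq)))
      simp [hfp, hgp, this]
    · have hap : a ≠ p := fun e => (List.nodup_cons.mp hl).1 (e ▸ h)
      have := ih (List.nodup_cons.mp hl).2 h (fun q hq hqp => hne q (by simp [hq]) hqp)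
      simp [List.countP_cons, hne a (by simp) hap, this]
      omega

-- loop invariant for A's fold
lemma check_inv (l : List (List Int)) (seen : List (List Int))
    (d : PySem.Dict (List Int) Bool) (c : Int)
    (hd : ∀ q, d.get? q = if q ∈ seen then some (decide (2 ≤ seen.count q)) else none)
    (hc : c = ((PySem.Set.ofList seen).countP (fun k => decide (2 ≤ seen.count k)) : Int)) :
    (l.foldl checkStep (d, c)).2
      = (((PySem.Set.ofList (seen ++ l)).countP
            (fun k => decide (2 ≤ (seen ++ l).count k)) : Nat) : Int) := by
  induction l generalizing seen d c with
  | nil => simpa using hc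
  | cons p t ih =>
    have hmemkeys : ∀ q, (d.contains q) = decide (q ∈ seen) := by
      intro q
      rw [PySem.Dict.contains_eq_isSome_get?, hd q]
      by_cases hq : q ∈ seen <;> simp [hq]
    have step : List.foldl checkStep (d, c) (p :: t) = List.foldl checkStep (checkStep (d, c) p) t := rfl
    rw [step]
    have hseen' : seen ++ p :: t = (seen ++ [p]) ++ t := by simp
    rw [hseen']
    by_cases hp : p ∈ seen
    · have hcont : d.contains p = true := by simp [hmemkeys, hp]
      by_cases h2 : 2 ≤ seen.count p
      · -- already counted: no change
        have hget : d.getD p false = true := by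
          simp [PySem.Dict.getD_eq_get?_getD, hd p, hp, h2]
        have hstep : checkStep (d, c) p = (d, c) := by
          simp [checkStep, hcont, hget]
        rw [hstep]
        apply ih (seen ++ [p]) d c
        · intro q
          rw [hd q]
          by_cases hpq : p = q
          · subst hpq
            have hcq : (seen ++ [p]).count p = seen.count p + 1 := by
              simp [List.count_append]
            have h2' : 2 ≤ seen.count p + 1 := by omega
            simp [hp, hcq, h2, h2']
          · have hqp : ¬ (q = p) := fun e => hpq e.symm
            have hcq : (seen ++ [p]).count q = seen.count q := by
              simp [List.count_append, hpq]
            by_cases hq : q ∈ seen <;> simp [hq, hqp, hcq]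
        · rw [hc]
          congr 1
          rw [PySem.Set.ofList_append_singleton,
              PySem.Set.add_of_mem (by simp [PySem.Set.mem_ofList, hp])]
          apply countP_congr_mem
          intro k hk
          by_cases hpk : p = k
          · subst hpk
            have hcq : (seen ++ [p]).count p = seen.count p + 1 := by
              simp [List.count_append]
            have h2' : 2 ≤ seen.count p + 1 := by omega
            simp [hcq, h2, h2']
          · have hcq : (seen ++ [p]).count k = seen.count k := by
              simp [List.count_append, hpk]
            simp [hcq]
      · -- second occurrence: flag and count
        have hget : d.getD p false = false := by
          simp [PySem.Dict.getD_eq_get?_getD, hd p, hp, h2]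
        have hstep : checkStep (d, c) p = (d.insert p true, c + 1) := by
          simp [checkStep, hcont, hget]
        rw [hstep]
        have hcnt1 : seen.count p = 1 := by
          have := List.count_pos_iff.mpr hp
          omega
        apply ih (seen ++ [p]) (d.insert p true) (c + 1)
        · intro q
          rw [PySem.Dict.get?_insert]
          by_cases hqp : q = p
          · rw [hqp]
            have hcq : (seen ++ [p]).count p = 2 := by
              simp [List.count_append, hcnt1]
            simp [hp, hcq]
          · rw [hd q]
            have hpq : ¬ (p = q) := fun e => hqp e.symm
            have hcq : (seen ++ [p]).count q = seen.count q := by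
              simp [List.count_append, hpq]
            by_cases hq : q ∈ seen <;> simp [hq, hqp, hcq]
        · rw [hc]
          have hnd : (PySem.Set.ofList seen).Nodup := PySem.Set.nodup_ofList seen
          have hmem : p ∈ PySem.Set.ofList seen := by simp [PySem.Set.mem_ofList, hp]
          rw [PySem.Set.ofList_append_singleton, PySem.Set.add_of_mem hmem]
          have hflip := countP_flip (PySem.Set.ofList seen) hnd p hmem
            (fun k => decide (2 ≤ seen.count k)) (fun k => decide (2 ≤ (seen ++ [p]).count k))
            (fun q hq hqp => by
              have hpq : ¬ (p = q) := fun e => hqp e.symm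
              have hcq : (seen ++ [p]).count q = seen.count q := by
                simp [List.count_append, hpq]
              simp [hcq])
            (by simp [hcnt1])
            (by simp [List.count_append, hcnt1])
          rw [hflip]
          push_cast
          ring
    · -- first occurrence
      have hcont : d.contains p = false := by simp [hmemkeys, hp]
      have hstep : checkStep (d, c) p = (d.insert p false, c) := by
        simp [checkStep, hcont]
      rw [hstep]
      have hcnt0 : seen.count p = 0 := List.count_eq_zero.mpr hp
      apply ih (seen ++ [p]) (d.insert p false) c
      · intro q
        rw [PySem.Dict.get?_insert]
        by_cases hqp : q = p
        · rw [hqp]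
          have hcq : (seen ++ [p]).count p = 1 := by
            simp [List.count_append, hcnt0]
          simp [hcq]
        · rw [hd q]
          have hpq : ¬ (p = q) := fun e => hqp e.symm
          have hcq : (seen ++ [p]).count q = seen.count q := by
            simp [List.count_append, hpq]
          by_cases hq : q ∈ seen <;> simp [hq, hqp, hcq]
      · rw [hc]
        congr 1
        rw [PySem.Set.ofList_append_singleton,
            PySem.Set.add_of_not_mem (by simp [PySem.Set.mem_ofList, hp])]
        rw [List.countP_append]
        have h1 : List.countP (fun k => decide (2 ≤ (seen ++ [p]).count k)) [p] = 0 := by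
          simp [List.count_append, hcnt0]
        rw [h1]
        have hcg := countP_congr_mem (PySem.Set.ofList seen)
          (fun k => decide (2 ≤ seen.count k)) (fun k => decide (2 ≤ (seen ++ [p]).count k))
          (fun k hk => by
            have hpk : ¬ (p = k) := fun e => hp (by rw [e]; exact (PySem.Set.mem_ofList _ _).mp hk)
            have hcq : (seen ++ [p]).count k = seen.count k := by
              simp [List.count_append, hpk]
            simp [hcq])
        omega

-- B's repeated partition computes the same distinct-duplicate count
lemma checkAltGo_eq (n : Nat) (l : List (List Int)) (crash : Int) (hn : l.length ≤ n) :
    checkAltGo n l crash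
      = crash + (((PySem.Set.ofList l).countP (fun k => decide (2 ≤ l.count k)) : Nat) : Int) := by
  induction n generalizing l crash with
  | zero =>
    have : l = [] := List.length_eq_zero_iff.mp (Nat.le_zero.mp hn)
    subst this; simp [checkAltGo]
  | succ n ih =>
    cases l with
    | nil => simp [checkAltGo]
    | cons p t =>
      rw [checkAltGo]
      have hrl : (t.filter (fun q => q ≠ p)).length ≤ n := by
        have := List.length_filter_le (fun q => decide (q ≠ p)) t
        simp at hn
        omega
      rw [ih _ _ hrl]
      set rest := t.filter (fun q => q ≠ p) with hrest
      -- group size = count of p in p :: t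
      have hgrp : ((p :: t).length : Int) - (rest.length : Int) = ((p :: t).count p : Int) := by
        have h1 : t.length = rest.length + t.count p := by
          have hlen := List.length_eq_countP_add_countP (fun q => decide (q ≠ p)) (l := t)
          have h2 : t.countP (fun a => decide (¬decide (a ≠ p) = true)) = t.count p := by
            apply countP_congr_mem
            intro x hx
            by_cases hxp : x = p <;> simp [hxp]
          rw [h2] at hlen
          rw [hrest, ← List.countP_eq_length_filter]
          omega
        simp [h1]
        ring
      -- counts in rest for q ≠ p are unchanged
      have hcr : ∀ q, q ≠ p → rest.count q = (p :: t).count q := by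
        intro q hq
        rw [hrest, List.count_filter (by simp [hq]), List.count_cons]
        simp [Ne.symm hq]
      -- set of (p :: t) is a permutation of p :: set of rest
      have hpr : p ∉ rest := by simp [hrest]
      have hperm : List.Perm (PySem.Set.ofList (p :: t)) (p :: PySem.Set.ofList rest) := by
        rw [List.perm_ext_iff_of_nodup (PySem.Set.nodup_ofList _)
          (List.nodup_cons.mpr ⟨by simp [PySem.Set.mem_ofList, hpr], PySem.Set.nodup_ofList _⟩)]
        intro a
        simp only [PySem.Set.mem_ofList, List.mem_cons, hrest, List.mem_filter]
        by_cases hap : a = p <;> simp [hap]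
      rw [List.Perm.countP_eq _ hperm, List.countP_cons]
      have hcg : (PySem.Set.ofList rest).countP (fun k => decide (2 ≤ (p :: t).count k))
          = (PySem.Set.ofList rest).countP (fun k => decide (2 ≤ rest.count k)) := by
        apply countP_congr_mem
        intro k hk
        have hkp : k ≠ p := by
          intro e; exact hpr (e ▸ (PySem.Set.mem_ofList _ _).mp hk)
        rw [hcr k hkp]
      rw [hcg]
      have hcnt : (2 ≤ ((p :: t).length : Int) - (rest.length : Int)) ↔ (2 ≤ (p :: t).count p) := by
        rw [hgrp]; exact_mod_cast Iff.rfl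
      by_cases h2 : 2 ≤ (p :: t).count p
      · have hmem : p ∈ t := by
          have h2' := h2
          rw [List.count_cons_self] at h2'
          exact List.count_pos_iff.mp (by omega)
        rw [if_pos (hcnt.mpr h2), if_pos (by simp [hmem])]
        push_cast
        ring
      · have hnmem : p ∉ t := by
          intro hm
          have hc := List.count_pos_iff.mpr hm
          rw [List.count_cons_self] at h2
          omega
        rw [if_neg (fun h => h2 (hcnt.mp h)), if_neg (by simp [hnmem])]
        push_cast
        ring

-- ===== VERDICT (by name: the statement is the Claim_ definition above) =====
theorem check_spec : Claim_equal_check := by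
  intro points _
  unfold Spec_check check check_alt
  rw [checkAltGo_eq _ _ _ (le_refl _)]
  have := check_inv points [] PySem.Dict.empty 0
    (by intro q; simp [PySem.Dict.get?_empty]) (by simp)
  simpa using this
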